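-- pv_equiv track=rewrite | github.com/FedorF/leetcode | Problems/Daily Challenge/Medium/1043. Partition Array for Maximum Sum/solution_dp.py | calc_max_sum_partitioned
-- ===== SOURCE A (Python) =====
-- from typing import List
--
-- def calc_max_sum_partitioned(xs: List[int], k: int) -> int:
--     """
--     DP Approach with Round Robin storage.
--     We need only k element in memory, so use Round Robin approach.
--
--     Time complexity: O(len(xs) * k)
--     Space complexity: O(k)
--
--     """
--     if k == 1:
--         return sum(xs)
--
--     if k >= len(xs):
--         return len(xs) * max(xs)
--
--     dp = [0] * k
--     dp[0] = xs[0]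
--     for i in range(1, len(xs)):
--         window_max_el = max_at_i = 0
--         for j in range(i, i - k, -1):
--             if j < 0:
--                 break
--
--             window_max_el = max(window_max_el, xs[j])
--             window_size = i + 1 - j
--             cur_sum = window_max_el * window_size
--             sub_sum = dp[(j - 1) % k] if j > 0 else dp[-1]
--             max_at_i = max(max_at_i, cur_sum + sub_sum)
--         dp[i % k] = max_at_i
--
--     return dp[(len(xs) - 1) % k]
-- ===== SOURCE B (Python) =====
-- def calc_max_sum_partitioned(xs, k):
--     if k == 1:
--         return sum(xs)
--     n = len(xs)
--     if k >= n:
--         return n * max(xs)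
--
--     memo = {}
--
--     def dfs(i):
--         # value of the DP recurrence for the prefix xs[:i+1]
--         if i in memo:
--             return memo[i]
--         if i == 0:
--             res = xs[0]
--         else:
--             best = 0
--             wmax = 0
--             l = 1
--             while l <= k and l <= i + 1:
--                 wmax = max(wmax, xs[i - l + 1])
--                 cand = wmax * l + (dfs(i - l) if l <= i else 0)
--                 best = max(best, cand)
--                 l += 1
--             res = best
--         memo[i] = res
--         return res
--
--     for i in range(n):  # warm the memo in index order: keeps recursion depth O(1)
--         dfs(i)
--     return dfs(n - 1)
-- ===== Notes on version B (the rewrite author's own statement) =====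
-- stated objective: alternative
-- what changed: Replaced the bottom-up round-robin DP array (O(k) rolling storage, index arithmetic with (j-1)%k and dp[-1]) by top-down memoized recursion dfs(i) over prefixes, computing the same recurrence; the two guard branches (k==1, k>=len) are kept.
import Mathlib
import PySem

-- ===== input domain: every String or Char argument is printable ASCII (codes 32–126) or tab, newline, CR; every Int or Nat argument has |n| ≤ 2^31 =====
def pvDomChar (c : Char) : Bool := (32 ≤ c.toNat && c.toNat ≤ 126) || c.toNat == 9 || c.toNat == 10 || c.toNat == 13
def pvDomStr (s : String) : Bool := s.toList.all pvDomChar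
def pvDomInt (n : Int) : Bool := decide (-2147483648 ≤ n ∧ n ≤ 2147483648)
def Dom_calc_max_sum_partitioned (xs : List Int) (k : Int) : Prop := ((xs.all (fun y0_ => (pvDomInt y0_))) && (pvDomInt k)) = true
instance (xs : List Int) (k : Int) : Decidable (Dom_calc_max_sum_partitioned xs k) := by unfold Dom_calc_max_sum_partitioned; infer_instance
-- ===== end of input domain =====

-- B replaces A's bottom-up round-robin DP array by top-down recursion on prefix indices
-- computing the same recurrence (same two guard branches); return values proved equal on Pre_.

-- ===== PORT A =====
-- inner 'for j in range(i, i-k, -1): if j < 0: break …' — the break fires at the top of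
-- the body on a condition of j alone, so the iterated j's are exactly takeWhile (0 ≤ ·).
def calc_max_sum_partitioned (xs : List Int) (k : Int) : Int :=
  if k = 1 then xs.sum
  else if (xs.length : Int) ≤ k then
    match PySem.List.max? xs (fun y => y) with
    | some m => (xs.length : Int) * m
    | none => 0  -- unreachable under Pre_ (Python raises ValueError on max([]))
  else
    let dp0 : List Int := PySem.List.pySetD (List.replicate k.toNat 0) 0 (PySem.List.pyGetD xs 0 0)
    let dp := ((PySem.List.pyRange 1 (xs.length : Int) 1).foldl
      (fun (dp : List Int) i =>
        let st := ((PySem.List.pyRange i (i - k) (-1)).takeWhile (fun j => decide (0 ≤ j))).foldl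
          (fun (st : Int × Int) j =>
            let wmax := max st.1 (PySem.List.pyGetD xs j 0)
            let cur := wmax * (i + 1 - j)
            let sub := if 0 < j then PySem.List.pyGetD dp (PySem.Int.mod (j - 1) k) 0
                       else PySem.List.pyGetD dp (-1) 0
            (wmax, max st.2 (cur + sub)))
          (0, 0)
        PySem.List.pySetD dp (PySem.Int.mod i k) st.2)
      dp0)
    PySem.List.pyGetD dp (PySem.Int.mod ((xs.length : Int) - 1) k) 0

-- ===== PORT B =====
-- dfs(i) of Source B; the memo dict and the cache-warming loop are a pure cache, ported as plain recursion on i;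
-- the 'while l <= k and l <= i + 1' loop is the fold over l = 1 .. min(k, i+1).
def altDfs (xs : List Int) (k : Int) (i : Nat) : Int :=
  if _h : i = 0 then PySem.List.pyGetD xs 0 0
  else
    ((List.range' 1 (min k.toNat (i + 1))).attach.foldl
      (fun (st : Int × Int) lp =>
        let wmax := max st.1 (PySem.List.pyGetD xs ((i : Int) - lp.1 + 1) 0)
        let sub := if lp.1 ≤ i then altDfs xs k (i - lp.1) else 0
        (wmax, max st.2 (wmax * (lp.1 : Int) + sub)))
      (0, 0)).2
termination_by i
decreasing_by
  have hl : lp.1 ∈ List.range' 1 (min k.toNat (i + 1)) := lp.2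
  simp [List.mem_range'] at hl
  omega

def calc_max_sum_partitioned_alt (xs : List Int) (k : Int) : Int :=
  if k = 1 then xs.sum
  else if (xs.length : Int) ≤ k then
    match PySem.List.max? xs (fun y => y) with
    | some m => (xs.length : Int) * m
    | none => 0  -- unreachable under Pre_ (Python raises ValueError on max([]))
  else altDfs xs k (xs.length - 1)

-- ===== PRECONDITION & SPEC =====
-- Pre_ excludes exactly the inputs where Python A raises: empty xs with k ≠ 1
-- (ValueError from max([])) and nonempty xs with k < 1 (IndexError on dp[0]).
def Pre_calc_max_sum_partitioned (xs : List Int) (k : Int) : Prop :=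
  k = 1 ∨ (1 ≤ k ∧ xs ≠ [])
instance (xs : List Int) (k : Int) : Decidable (Pre_calc_max_sum_partitioned xs k) := by
  unfold Pre_calc_max_sum_partitioned; infer_instance

def pvWitness_calc_max_sum_partitioned : List Int × Int := ([1, 15, 7, 9, 2, 5, 10], 3)

def Spec_calc_max_sum_partitioned (xs : List Int) (k : Int) (out : Int) : Prop := out = calc_max_sum_partitioned_alt xs k
instance (xs : List Int) (k : Int) (out : Int) : Decidable (Spec_calc_max_sum_partitioned xs k out) := by unfold Spec_calc_max_sum_partitioned; infer_instance

-- ===== CLAIM (what is proved, stated in full; the proofs are below) =====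
def Claim_equal_calc_max_sum_partitioned : Prop := ∀ (xs : List Int) (k : Int), Dom_calc_max_sum_partitioned xs k → Pre_calc_max_sum_partitioned xs k → Spec_calc_max_sum_partitioned xs k (calc_max_sum_partitioned xs k)

-- ===== LEMMAS AND PROOFS =====

lemma takeWhile_range'_lt (c : Nat) : ∀ (n s : Nat),
    (List.range' s n).takeWhile (fun t => decide (t < c)) = List.range' s (min n (c - s)) := by
  intro n
  induction n with
  | zero => intro s; simp
  | succ m ih =>
    intro s
    rw [List.range'_succ]
    by_cases hs : s < c
    · rw [List.takeWhile_cons_of_pos (by simpa using hs), ih (s+1)]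
      have h : min (m + 1) (c - s) = min m (c - (s+1)) + 1 := by omega
      rw [h, List.range'_succ]
    · rw [List.takeWhile_cons_of_neg (by simpa using hs)]
      have h : min (m + 1) (c - s) = 0 := by omega
      rw [h]; simp

lemma takeWhile_range_lt (n c : Nat) :
    (List.range n).takeWhile (fun t => decide (t < c)) = List.range (min n c) := by
  rw [List.range_eq_range', takeWhile_range'_lt c n 0]
  have h : min n (c - 0) = min n c := by omega
  rw [h, List.range_eq_range']

-- A's inner iterated j-list [i, i-1, …, max(i-k+1, 0)] is B's l-list mapped by l ↦ i - l + 1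
lemma jlist_eq (i : Nat) (k : Int) (hk : 0 ≤ k) :
    (PySem.List.pyRange (i : Int) ((i : Int) - k) (-1)).takeWhile (fun j => decide (0 ≤ j))
      = (List.range' 1 (min k.toNat (i + 1))).map (fun l : Nat => (i : Int) - l + 1) := by
  rw [PySem.List.pyRange_neg_one]
  have h1 : ((i : Int) - ((i : Int) - k)).toNat = k.toNat := by omega
  rw [h1, List.takeWhile_map]
  have h2 : ((fun j => decide ((0:Int) ≤ j)) ∘ (fun t : Nat => (i : Int) - t))
      = fun t : Nat => decide (t < i + 1) := by
    funext t; simp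
  rw [h2, takeWhile_range_lt, List.range'_eq_map_range, List.map_map, Nat.min_comm]
  apply List.map_congr_left
  intro t _; simp only [Function.comp_apply]; push_cast; ring

lemma foldl_attach_congr {α β : Type} (l : List α) (g : β → {x // x ∈ l} → β) (f : β → α → β)
    (init : β) (h : ∀ acc (x : {x // x ∈ l}), g acc x = f acc x.1) :
    l.attach.foldl g init = l.foldl f init := by
  calc l.attach.foldl g init
      = l.attach.foldl (fun acc x => f acc x.1) init :=
        PySem.List.foldl_congr_mem _ _ _ _ (fun acc x _ => h acc x)
    _ = l.foldl f init := List.foldl_attach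

-- proof-only abbreviations of A's inner fold and of A's dp state after rounds 1 .. m-1
def innerF (xs : List Int) (k : Int) (dp : List Int) (i : Int) : Int × Int :=
  ((PySem.List.pyRange i (i - k) (-1)).takeWhile (fun j => decide (0 ≤ j))).foldl
    (fun (st : Int × Int) j =>
      let wmax := max st.1 (PySem.List.pyGetD xs j 0)
      let cur := wmax * (i + 1 - j)
      let sub := if 0 < j then PySem.List.pyGetD dp (PySem.Int.mod (j - 1) k) 0
                 else PySem.List.pyGetD dp (-1) 0
      (wmax, max st.2 (cur + sub)))
    (0, 0)

def stateA (xs : List Int) (k : Int) (m : Nat) : List Int :=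
  (PySem.List.pyRange 1 (m : Int) 1).foldl
    (fun dp i => PySem.List.pySetD dp (PySem.Int.mod i k) (innerF xs k dp i).2)
    (PySem.List.pySetD (List.replicate k.toNat 0) 0 (PySem.List.pyGetD xs 0 0))

-- A's inner loop at row i computes B's dfs(i), given the dp slots hold dfs of the last k rows
lemma innerF_eq (xs : List Int) (k : Int) (dp : List Int) (i : Nat)
    (hk2 : 2 ≤ k) (hi1 : 1 ≤ i) (hlen : dp.length = k.toNat)
    (hInv : ∀ r : Nat, r < i → i ≤ r + k.toNat → dp.getD (r % k.toNat) 0 = altDfs xs k r)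
    (hK1 : i ≤ k.toNat - 1 → dp.getD (k.toNat - 1) 0 = 0) :
    (innerF xs k dp (i : Int)).2 = altDfs xs k i := by
  unfold innerF
  rw [jlist_eq i k (by omega), List.foldl_map]
  have hstep : altDfs xs k i
      = ((List.range' 1 (min k.toNat (i + 1))).foldl
          (fun (st : Int × Int) (l : Nat) =>
            (max st.1 (PySem.List.pyGetD xs ((i : Int) - l + 1) 0),
              max st.2 (max st.1 (PySem.List.pyGetD xs ((i : Int) - l + 1) 0) * (l : Int)
                + if l ≤ i then altDfs xs k (i - l) else 0)))
          (0, 0)).2 := by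
    rw [altDfs, dif_neg (by omega : ¬ i = 0)]
    congr 1
    exact foldl_attach_congr _ _ _ _ (fun acc x => rfl)
  rw [hstep]
  congr 1
  apply PySem.List.foldl_congr_mem
  intro acc l hl
  rw [List.mem_range'_1] at hl
  simp only
  have hcur : (i : Int) + 1 - ((i : Int) - l + 1) = (l : Int) := by ring
  rw [hcur]
  by_cases hli : l ≤ i
  · rw [if_pos (by omega : (0:Int) < (i : Int) - l + 1), if_pos hli]
    have e1 : (i : Int) - (l : Int) + 1 - 1 = ((i - l : Nat) : Int) := by omega
    have e2 : k = ((k.toNat : Nat) : Int) := by omega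
    rw [e1]
    rw [show PySem.Int.mod ((i - l : Nat) : Int) k = (((i - l) % k.toNat : Nat) : Int) by
      rw [e2]; exact PySem.Int.mod_natCast _ _]
    rw [PySem.List.pyGetD_natCast]
    rw [hInv (i - l) (by omega) (by omega)]
  · rw [if_neg (by omega : ¬ (0:Int) < (i : Int) - l + 1), if_neg hli]
    have hne : dp ≠ [] := by
      intro h; rw [h] at hlen; simp at hlen; omega
    rw [PySem.List.pyGetD_neg_one dp 0 hne]
    have hgl : dp.getLast hne = dp.getD (k.toNat - 1) 0 := by
      rw [List.getLast_eq_getElem, List.getD_eq_getElem dp 0 (by omega)]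
      congr 1; omega
    rw [hgl, hK1 (by omega)]

lemma stateA_one (xs : List Int) (k : Int) :
    stateA xs k 1 = PySem.List.pySetD (List.replicate k.toNat 0) 0 (PySem.List.pyGetD xs 0 0) := by
  unfold stateA
  rw [show ((1 : Nat) : Int) = 1 from rfl, PySem.List.pyRange_one_eq_nil (le_refl 1), List.foldl_nil]

lemma stateA_succ (xs : List Int) (k : Int) (m : Nat) (hm : 1 ≤ m) :
    stateA xs k (m + 1)
      = PySem.List.pySetD (stateA xs k m) (PySem.Int.mod (m : Int) k)
          (innerF xs k (stateA xs k m) (m : Int)).2 := by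
  unfold stateA
  rw [show ((m + 1 : Nat) : Int) = (m : Int) + 1 by push_cast; ring,
    PySem.List.pyRange_one_succ_right (by exact_mod_cast hm), List.foldl_append,
    List.foldl_cons, List.foldl_nil]

lemma getD_set_self (l : List Int) (n : Nat) (v : Int) (h : n < l.length) :
    (l.set n v).getD n 0 = v := by
  rw [List.getD_eq_getElem _ _ (by simpa using h)]
  simp

lemma getD_set_ne (l : List Int) (n m : Nat) (v : Int) (h : n ≠ m) :
    (l.set n v).getD m 0 = l.getD m 0 := by
  simp [List.getD_eq_getElem?_getD, List.getElem?_set_ne h]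

lemma mod_ne_of_window (r m K : Nat) (h1 : r < m) (h2 : m < r + K) : r % K ≠ m % K := by
  intro h
  have hd : K ∣ (m - r) := (Nat.modEq_iff_dvd' (Nat.le_of_lt h1)).mp h
  have := Nat.le_of_dvd (by omega) hd
  omega

-- invariant: after rounds 1 .. m-1 the round-robin array holds dfs r in slot r % k for the
-- last k rows r < m, and slot k-1 (Python's dp[-1]) is still 0 while m ≤ k-1
lemma outer_inv (xs : List Int) (k : Int) (hk2 : 2 ≤ k) :
    ∀ m : Nat, 1 ≤ m → m ≤ xs.length →
    (stateA xs k m).length = k.toNat ∧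
    (∀ r : Nat, r < m → m ≤ r + k.toNat → (stateA xs k m).getD (r % k.toNat) 0 = altDfs xs k r) ∧
    (m ≤ k.toNat - 1 → (stateA xs k m).getD (k.toNat - 1) 0 = 0) := by
  intro m hm1
  induction m, hm1 using Nat.le_induction with
  | base =>
    intro _
    rw [stateA_one]
    rw [PySem.List.pySetD_of_nonneg _ _ (by omega : (0:Int) ≤ 0)]
    simp only [Int.toNat_zero]
    have hK : 2 ≤ k.toNat := by omega
    refine ⟨by simp, ?_, ?_⟩
    · intro r hr _
      interval_cases r
      rw [Nat.zero_mod, getD_set_self _ _ _ (by simp; omega)]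
      rw [altDfs, dif_pos rfl, PySem.List.pyGetD_zero]
    · intro _
      rw [getD_set_ne _ _ _ _ (by omega)]
      simp [List.getD_eq_getElem?_getD, List.getElem?_replicate]
      split <;> simp
  | succ m hm ih =>
    intro hmn
    obtain ⟨ihlen, ihinv, ihz⟩ := ih (by omega)
    have hin := innerF_eq xs k (stateA xs k m) m hk2 hm ihlen ihinv ihz
    rw [stateA_succ xs k m hm, hin]
    have e2 : k = ((k.toNat : Nat) : Int) := by omega
    rw [show PySem.Int.mod (m : Int) k = ((m % k.toNat : Nat) : Int) by
      rw [e2]; exact PySem.Int.mod_natCast _ _]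
    rw [PySem.List.pySetD_natCast]
    have hmk : m % k.toNat < k.toNat := Nat.mod_lt _ (by omega)
    refine ⟨by simp [ihlen], ?_, ?_⟩
    · intro r hr hrk
      by_cases hrm : r = m
      · subst hrm
        rw [getD_set_self _ _ _ (by rw [ihlen]; exact hmk)]
      · have hrlt : r < m := by omega
        rw [getD_set_ne _ _ _ _ (Ne.symm (mod_ne_of_window r m k.toNat hrlt (by omega)))]
        exact ihinv r hrlt (by omega)
    · intro hmK
      have hmsmall : m % k.toNat = m := Nat.mod_eq_of_lt (by omega)
      rw [getD_set_ne _ _ _ _ (by omega)]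
      exact ihz (by omega)

theorem main_eq (xs : List Int) (k : Int) (hpre : k = 1 ∨ (1 ≤ k ∧ xs ≠ [])) :
    calc_max_sum_partitioned xs k = calc_max_sum_partitioned_alt xs k := by
  by_cases h1 : k = 1
  · simp [calc_max_sum_partitioned, calc_max_sum_partitioned_alt, h1]
  by_cases h2 : (xs.length : Int) ≤ k
  · simp [calc_max_sum_partitioned, calc_max_sum_partitioned_alt, h1, h2]
  have hk1 : 1 ≤ k := by
    rcases hpre with h | ⟨h, _⟩
    · omega
    · exact h
  have hk2 : 2 ≤ k := by omega
  have hA : calc_max_sum_partitioned xs k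
      = PySem.List.pyGetD (stateA xs k xs.length) (PySem.Int.mod ((xs.length : Int) - 1) k) 0 := by
    simp only [calc_max_sum_partitioned, if_neg h1, if_neg h2]
    rfl
  have hB : calc_max_sum_partitioned_alt xs k = altDfs xs k (xs.length - 1) := by
    simp only [calc_max_sum_partitioned_alt, if_neg h1, if_neg h2]
  rw [hA, hB]
  obtain ⟨hlen, hinv, _⟩ := outer_inv xs k hk2 xs.length (by omega) (le_refl _)
  have e1 : ((xs.length : Int) - 1) = ((xs.length - 1 : Nat) : Int) := by omega
  have e2 : k = ((k.toNat : Nat) : Int) := by omega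
  rw [e1, show PySem.Int.mod ((xs.length - 1 : Nat) : Int) k
      = (((xs.length - 1) % k.toNat : Nat) : Int) by rw [e2]; exact PySem.Int.mod_natCast _ _,
    PySem.List.pyGetD_natCast]
  exact hinv (xs.length - 1) (by omega) (by omega)

-- ===== VERDICT (by name: the statement is the Claim_ definition above) =====
theorem calc_max_sum_partitioned_spec : Claim_equal_calc_max_sum_partitioned := by
  intro xs k _ hpre
  unfold Spec_calc_max_sum_partitioned
  exact main_eq xs k hpre
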